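-- pv_equiv track=rewrite | github.com/yogan-gopi/LeetCode | Enemy - GFG/enemy.py | largestArea
-- ===== SOURCE A (Python) =====
-- from typing import List
-- from typing import List
--
-- def largestArea(n:int,m:int,k:int, enemy : List[List[int]]) -> int:
--     # code here
--     rows = [0]
--     col = [0]
--     res = n*m
--     for i in enemy:
--         rows.append(i[0])
--         col.append(i[1])
--     rows.append(n+1)
--     col.append(m+1)
--     rows.sort()
--     col.sort()
--     maxR = 0
--     maxC = 0
--     for i in range(1, len(rows)):
--         maxR = max(maxR, rows[i]-rows[i-1]-1)
--     for i in range(1, len(col)):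
--         maxC = max(maxC, col[i]-col[i-1]-1)
--
--     return maxR*maxC
-- ===== SOURCE B (Python) =====
-- def _max_gap(vals):
--     # largest run of free cells between two occupied coordinates:
--     # for each value, look at the gap down to its predecessor (the largest
--     # strictly smaller value); no sorting needed.
--     best = 0
--     for v in vals:
--         below = [u for u in vals if u < v]
--         if below:
--             best = max(best, v - max(below) - 1)
--     return best
--
--
-- def largestArea(n: int, m: int, k: int, enemy):
--     rows = [0] + [e[0] for e in enemy] + [n + 1]
--     cols = [0] + [e[1] for e in enemy] + [m + 1]
--     return _max_gap(rows) * _max_gap(cols)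
-- ===== Notes on version B (the rewrite author's own statement) =====
-- stated objective: alternative
-- what changed: A collects coordinates, sorts each axis and scans adjacent gaps of the sorted list; B never sorts: for each coordinate it takes the gap down to its predecessor (the largest strictly smaller coordinate) and keeps the running maximum, an equal but sort-free formulation.
import Mathlib
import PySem

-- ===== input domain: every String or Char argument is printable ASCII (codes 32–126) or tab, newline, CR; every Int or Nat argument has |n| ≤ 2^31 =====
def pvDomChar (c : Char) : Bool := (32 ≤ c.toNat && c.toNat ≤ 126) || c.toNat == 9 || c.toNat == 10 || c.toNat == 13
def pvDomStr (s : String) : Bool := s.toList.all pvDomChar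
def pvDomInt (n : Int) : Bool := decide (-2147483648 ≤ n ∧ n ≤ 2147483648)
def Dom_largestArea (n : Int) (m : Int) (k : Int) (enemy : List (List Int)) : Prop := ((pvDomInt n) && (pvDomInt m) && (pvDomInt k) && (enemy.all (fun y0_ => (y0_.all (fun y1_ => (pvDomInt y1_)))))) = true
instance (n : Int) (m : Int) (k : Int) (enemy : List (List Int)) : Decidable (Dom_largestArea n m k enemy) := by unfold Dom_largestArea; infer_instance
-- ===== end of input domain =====

-- B replaces A's sort-then-scan-adjacent-gaps by a sort-free predecessor scan (for each
-- coordinate, the gap down to the largest strictly smaller coordinate); alternative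
-- algorithm, no speed claim. Equal return value on every input admitted by Pre_.

-- ===== PORT A =====
def largestArea (n : Int) (m : Int) (k : Int) (enemy : List (List Int)) : Int :=
  let rows : List Int := [0]
  let col : List Int := [0]
  let _res : Int := n * m   -- A computes res = n*m and never uses it
  let rc := enemy.foldl
    (fun (p : List Int × List Int) i =>
      (p.1 ++ [PySem.List.pyGetD i 0 0], p.2 ++ [PySem.List.pyGetD i 1 0])) (rows, col)
  let rows2 := rc.1 ++ [n + 1]
  let col2 := rc.2 ++ [m + 1]
  let srows := PySem.List.sorted rows2 (fun x => x) false
  let scol := PySem.List.sorted col2 (fun x => x) false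
  let maxR := (PySem.List.pyRange 1 (srows.length : Int) 1).foldl
    (fun a i => max a (PySem.List.pyGetD srows i 0 - PySem.List.pyGetD srows (i - 1) 0 - 1)) 0
  let maxC := (PySem.List.pyRange 1 (scol.length : Int) 1).foldl
    (fun a i => max a (PySem.List.pyGetD scol i 0 - PySem.List.pyGetD scol (i - 1) 0 - 1)) 0
  maxR * maxC

-- ===== PORT B =====
def pvMaxGap (vals : List Int) : Int :=
  vals.foldl (fun best v =>
    match PySem.List.max? (vals.filter (fun u => decide (u < v))) (fun x => x) with
    | some p => max best (v - p - 1)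
    | none => best) 0

def largestArea_alt (n : Int) (m : Int) (k : Int) (enemy : List (List Int)) : Int :=
  let rows := [0] ++ enemy.map (fun e => PySem.List.pyGetD e 0 0) ++ [n + 1]
  let cols := [0] ++ enemy.map (fun e => PySem.List.pyGetD e 1 0) ++ [m + 1]
  pvMaxGap rows * pvMaxGap cols

-- ===== PRECONDITION & SPEC =====
-- Pre_ excludes exactly the inputs on which Python A raises (IndexError on an enemy
-- entry with fewer than two coordinates); B raises there too.
def Pre_largestArea (n : Int) (m : Int) (k : Int) (enemy : List (List Int)) : Prop :=
  ∀ e ∈ enemy, 2 ≤ e.length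
instance (n : Int) (m : Int) (k : Int) (enemy : List (List Int)) : Decidable (Pre_largestArea n m k enemy) := by unfold Pre_largestArea; infer_instance
def pvWitness_largestArea : Int × Int × Int × List (List Int) := (3, 4, 1, [[2, 2]])

def Spec_largestArea (n : Int) (m : Int) (k : Int) (enemy : List (List Int)) (out : Int) : Prop := out = largestArea_alt n m k enemy
instance (n : Int) (m : Int) (k : Int) (enemy : List (List Int)) (out : Int) : Decidable (Spec_largestArea n m k enemy out) := by unfold Spec_largestArea; infer_instance

-- ===== CLAIM (what is proved, stated in full; the proofs are below) =====
def Claim_equal_largestArea : Prop := ∀ (n : Int) (m : Int) (k : Int) (enemy : List (List Int)), Dom_largestArea n m k enemy → Pre_largestArea n m k enemy → Spec_largestArea n m k enemy (largestArea n m k enemy)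

-- ===== LEMMAS AND PROOFS =====

-- the list of adjacent gaps b - a - 1 of a list
def pvGaps : List Int → List Int
  | a :: b :: t => (b - a - 1) :: pvGaps (b :: t)
  | _ => []

theorem pv_foldl_max_le_iff : ∀ (l : List Int) (a b : Int),
    l.foldl max a ≤ b ↔ (a ≤ b ∧ ∀ x ∈ l, x ≤ b)
  | [], a, b => by simp
  | x :: t, a, b => by
      rw [List.foldl_cons, pv_foldl_max_le_iff t, max_le_iff]
      constructor
      · rintro ⟨⟨h1, h2⟩, h3⟩
        exact ⟨h1, fun y hy => (List.mem_cons.mp hy).elim (fun e => e ▸ h2) (h3 y)⟩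
      · rintro ⟨h1, h2⟩
        exact ⟨⟨h1, h2 x List.mem_cons_self⟩, fun y hy => h2 y (List.mem_cons_of_mem _ hy)⟩

theorem pv_le_foldl_max_init (l : List Int) (a : Int) : a ≤ l.foldl max a :=
  ((pv_foldl_max_le_iff l a _).mp le_rfl).1

theorem pv_mem_le_foldl_max (l : List Int) (a x : Int) (hx : x ∈ l) : x ≤ l.foldl max a :=
  ((pv_foldl_max_le_iff l a _).mp le_rfl).2 x hx

theorem pv_foldl_max_eq (l1 l2 : List Int)
    (h1 : ∀ x ∈ l1, x ≤ l2.foldl max 0)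
    (h2 : ∀ x ∈ l2, x ≤ l1.foldl max 0) : l1.foldl max 0 = l2.foldl max 0 :=
  le_antisymm ((pv_foldl_max_le_iff l1 0 _).mpr ⟨pv_le_foldl_max_init l2 0, h1⟩)
    ((pv_foldl_max_le_iff l2 0 _).mpr ⟨pv_le_foldl_max_init l1 0, h2⟩)

theorem pvGaps_length : ∀ (s : List Int), (pvGaps s).length = s.length - 1
  | [] => rfl
  | [_] => rfl
  | a :: b :: t => by
      have := pvGaps_length (b :: t)
      simp only [pvGaps, List.length_cons] at *
      omega

theorem pvGaps_getElem : ∀ (s : List Int) (j : Nat) (h : j + 1 < s.length)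
    (h' : j < (pvGaps s).length), (pvGaps s)[j] = s[j + 1] - s[j] - 1
  | a :: b :: t, 0, _, _ => rfl
  | a :: b :: t, j + 1, h, h' => by
      have hh : j + 1 < (b :: t).length := by simpa using h
      have hh' : j < (pvGaps (b :: t)).length := by
        simpa [pvGaps] using h'
      have := pvGaps_getElem (b :: t) j hh hh'
      simpa [pvGaps] using this

-- A's indexed loop over the sorted list is the fold of max over the adjacent gaps
theorem pv_A1 (s : List Int) (c : Int) :
    (PySem.List.pyRange 1 (s.length : Int) 1).foldl
      (fun a i => max a (PySem.List.pyGetD s i 0 - PySem.List.pyGetD s (i - 1) 0 - 1)) c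
    = (pvGaps s).foldl max c := by
  have hmap : (PySem.List.pyRange 1 (s.length : Int) 1).map
      (fun i => PySem.List.pyGetD s i 0 - PySem.List.pyGetD s (i - 1) 0 - 1) = pvGaps s := by
    apply List.ext_getElem
    · simp only [List.length_map, PySem.List.length_pyRange_one, pvGaps_length]
      omega
    · intro j h1 h2
      have hj : j + 1 < s.length := by
        simp only [List.length_map, PySem.List.length_pyRange_one] at h1
        omega
      have hr : (PySem.List.pyRange 1 (s.length : Int) 1)[j]'(by
          simp only [PySem.List.length_pyRange_one] at h1 ⊢; omega) = 1 + (j : Int) := by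
        simp
      rw [List.getElem_map, hr]
      have e1 : PySem.List.pyGetD s (1 + (j : Int)) 0 = s[j + 1] := by
        rw [PySem.List.pyGetD_eq_getElem s 0 (by omega) (by omega)]
        congr 1
        omega
      have e2 : PySem.List.pyGetD s (1 + (j : Int) - 1) 0 = s[j]'(by omega) := by
        rw [PySem.List.pyGetD_eq_getElem s 0 (by omega) (by omega)]
        congr 1
        omega
      rw [e1, e2, pvGaps_getElem s j hj h2]
  rw [← hmap, List.foldl_map]

-- A's coordinate-collecting loop over enemy
theorem pv_build : ∀ (enemy : List (List Int)) (r c : List Int),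
    enemy.foldl (fun (p : List Int × List Int) i =>
      (p.1 ++ [PySem.List.pyGetD i 0 0], p.2 ++ [PySem.List.pyGetD i 1 0])) (r, c)
    = (r ++ enemy.map (fun e => PySem.List.pyGetD e 0 0),
       c ++ enemy.map (fun e => PySem.List.pyGetD e 1 0))
  | [], r, c => by simp
  | e :: t, r, c => by
      simp only [List.foldl_cons, List.map_cons]
      rw [pv_build t]
      simp

-- the per-element contribution of B's loop
def pvPred (V : List Int) (v : Int) : Option Int :=
  (PySem.List.max? (V.filter (fun u => decide (u < v))) (fun x => x)).map (fun p => v - p - 1)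

-- B's loop is the fold of max over its non-skipped contributions
theorem pv_B1 (V : List Int) : ∀ (l : List Int) (c : Int),
    l.foldl (fun best v =>
      match PySem.List.max? (V.filter (fun u => decide (u < v))) (fun x => x) with
      | some p => max best (v - p - 1)
      | none => best) c
    = (l.filterMap (pvPred V)).foldl max c
  | [], _ => rfl
  | v :: t, c => by
      simp only [List.foldl_cons, List.filterMap_cons]
      cases h : PySem.List.max? (V.filter (fun u => decide (u < v))) (fun x => x) with
      | none => simp only [pvPred, h, Option.map_none]; exact pv_B1 V t c
      | some p => simp only [pvPred, h, Option.map_some, List.foldl_cons]; exact pv_B1 V t _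

theorem pv_mem_gaps_decomp : ∀ (s : List Int) (g : Int), g ∈ pvGaps s →
    ∃ l a b r, s = l ++ a :: b :: r ∧ g = b - a - 1
  | [], g, hg => by simp [pvGaps] at hg
  | [_], g, hg => by simp [pvGaps] at hg
  | a :: b :: t, g, hg => by
      rcases List.mem_cons.mp (by simpa [pvGaps] using hg) with h | h
      · exact ⟨[], a, b, t, rfl, h⟩
      · obtain ⟨l, x, y, r, he, hgv⟩ := pv_mem_gaps_decomp (b :: t) g h
        exact ⟨a :: l, x, y, r, by rw [List.cons_append, ← he], hgv⟩

theorem pv_gaps_cons (a : Int) (w : List Int) (hw : w ≠ []) :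
    pvGaps (a :: w) = (w.head hw - a - 1) :: pvGaps w := by
  cases w with
  | nil => simp at hw
  | cons b t => rfl

theorem pv_gaps_mem_of_decomp : ∀ (l : List Int) (x y : Int) (r : List Int),
    (y - x - 1) ∈ pvGaps (l ++ x :: y :: r)
  | [], x, y, r => by simp [pvGaps]
  | a :: l, x, y, r => by
      rw [List.cons_append, pv_gaps_cons a (l ++ x :: y :: r) (by simp)]
      exact List.mem_cons_of_mem _ (pv_gaps_mem_of_decomp l x y r)

-- in a sorted list split around an adjacent pair (a, b), anything below b is at most a
theorem pv_sorted_before (l : List Int) (a b : Int) (r : List Int)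
    (hpw : (l ++ a :: b :: r).Pairwise (· ≤ ·)) :
    ∀ u ∈ l ++ a :: b :: r, u < b → u ≤ a := by
  intro u hu hub
  rcases List.mem_append.mp hu with h | h
  · exact (List.pairwise_append.mp hpw).2.2 u h a (by simp)
  · rcases List.mem_cons.mp h with h | h
    · exact le_of_eq h
    · have habr : (a :: b :: r).Pairwise (· ≤ ·) := (List.pairwise_append.mp hpw).2.1
      have hbr : (b :: r).Pairwise (· ≤ ·) := habr.of_cons
      rcases List.mem_cons.mp h with h2 | h2
      · omega
      · have := List.rel_of_pairwise_cons hbr h2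
        omega

-- in a sorted list, between a value ≤ p and a value v > p with nothing of the list
-- strictly between p and v, some adjacent pair straddles [p, v]
theorem pv_find_pair : ∀ (t : List Int) (a p v : Int),
    (a :: t).Pairwise (· ≤ ·) → v ∈ t → a ≤ p → p < v →
    (∀ u ∈ a :: t, u < v → u ≤ p) →
    ∃ l x y r, a :: t = l ++ x :: y :: r ∧ x ≤ p ∧ v ≤ y
  | [], _, _, v, _, hv, _, _, _ => absurd hv (List.not_mem_nil (a := v))
  | y0 :: t', a, p, v, hpw, hv, hap, hpv, hub => by
      rcases le_or_gt v y0 with hy | hy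
      · exact ⟨[], a, y0, t', rfl, hap, hy⟩
      · 
        have hy0p : y0 ≤ p := hub y0 (by simp) hy
        have hvt : v ∈ t' := by
          rcases List.mem_cons.mp hv with h | h
          · omega
          · exact h
        obtain ⟨l, x, y, r, he, hx, hvy⟩ := pv_find_pair t' y0 p v hpw.of_cons hvt hy0p hpv
          (fun u hu hlt => hub u (List.mem_cons_of_mem _ hu) hlt)
        exact ⟨a :: l, x, y, r, by rw [List.cons_append, ← he], hx, hvy⟩

-- the heart: max adjacent gap of the sorted list = max predecessor gap of the raw list
theorem pv_gap_eq (L : List Int) :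
    (pvGaps (PySem.List.sorted L (fun x => x) false)).foldl max 0
      = (L.filterMap (pvPred L)).foldl max 0 := by
  have hperm : (PySem.List.sorted L (fun x => x) false).Perm L :=
    PySem.List.sorted_perm L (fun x => x) false
  have hpw : (PySem.List.sorted L (fun x => x) false).Pairwise (· ≤ ·) := by
    simpa using PySem.List.sorted_pairwise L (fun x => x)
  apply pv_foldl_max_eq
  · intro g hg
    obtain ⟨l, a, b, r, he, rfl⟩ := pv_mem_gaps_decomp _ g hg
    by_cases hab : a < b
    · have hbL : b ∈ L := hperm.mem_iff.mp (by rw [he]; simp)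
      have haL : a ∈ L := hperm.mem_iff.mp (by rw [he]; simp)
      have hafil : a ∈ L.filter (fun u => decide (u < b)) :=
        List.mem_filter.mpr ⟨haL, by simpa using hab⟩
      obtain ⟨p, hp⟩ : ∃ p, PySem.List.max? (L.filter (fun u => decide (u < b))) (fun x => x) = some p := by
        cases h : PySem.List.max? (L.filter (fun u => decide (u < b))) (fun x => x) with
        | none =>
            have := (PySem.List.max?_eq_none_iff _ _).mp h
            rw [this] at hafil
            simp at hafil
        | some p => exact ⟨p, rfl⟩
      have hpfil := List.mem_filter.mp (PySem.List.max?_mem hp)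
      have hpb : p < b := by simpa using hpfil.2
      have hps : p ∈ PySem.List.sorted L (fun x => x) false := hperm.mem_iff.mpr hpfil.1
      have hpa : p ≤ a := pv_sorted_before l a b r (he ▸ hpw) p (he ▸ hps) hpb
      have hap : a ≤ p := PySem.List.max?_isMax hp a hafil
      have hmem : (b - a - 1) ∈ L.filterMap (pvPred L) :=
        List.mem_filterMap.mpr ⟨b, hbL, by
          simp only [pvPred, hp, Option.map_some, Option.some.injEq]
          omega⟩
      exact pv_mem_le_foldl_max _ _ _ hmem
    · have h0 : (0 : Int) ≤ (L.filterMap (pvPred L)).foldl max 0 := pv_le_foldl_max_init _ _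
      omega
  · intro g hg
    obtain ⟨v, hvL, hpv⟩ := List.mem_filterMap.mp hg
    simp only [pvPred] at hpv
    cases hp : PySem.List.max? (L.filter (fun u => decide (u < v))) (fun x => x) with
    | none => rw [hp] at hpv; simp at hpv
    | some p =>
      rw [hp] at hpv
      simp only [Option.map_some, Option.some.injEq] at hpv
      have hpfil := List.mem_filter.mp (PySem.List.max?_mem hp)
      have hplt : p < v := by simpa using hpfil.2
      have hub : ∀ u ∈ PySem.List.sorted L (fun x => x) false, u < v → u ≤ p := by
        intro u hu hlt
        exact PySem.List.max?_isMax hp u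
          (List.mem_filter.mpr ⟨hperm.mem_iff.mp hu, by simpa using hlt⟩)
      have hvs : v ∈ PySem.List.sorted L (fun x => x) false := hperm.mem_iff.mpr hvL
      have hps : p ∈ PySem.List.sorted L (fun x => x) false := hperm.mem_iff.mpr hpfil.1
      cases hs : PySem.List.sorted L (fun x => x) false with
      | nil => rw [hs] at hvs; simp at hvs
      | cons a t =>
        rw [hs] at hvs hps hub
        have hpw' : (a :: t).Pairwise (· ≤ ·) := hs ▸ hpw
        have hap : a ≤ p := by
          rcases List.mem_cons.mp hps with h | h
          · omega
          · exact List.rel_of_pairwise_cons hpw' h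
        have hvt : v ∈ t := by
          rcases List.mem_cons.mp hvs with h | h
          · omega
          · exact h
        obtain ⟨l, x, y, r, he, hxp, hvy⟩ := pv_find_pair t a p v hpw' hvt hap hplt hub
        have hmem : (y - x - 1) ∈ pvGaps (a :: t) := by
          rw [he]
          exact pv_gaps_mem_of_decomp l x y r
        have := pv_mem_le_foldl_max _ 0 _ hmem
        omega

-- one axis of A equals one axis of B
theorem pv_axis (L : List Int) :
    (PySem.List.pyRange 1 (((PySem.List.sorted L (fun x => x) false).length : Int)) 1).foldl
      (fun a i => max a (PySem.List.pyGetD (PySem.List.sorted L (fun x => x) false) i 0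
        - PySem.List.pyGetD (PySem.List.sorted L (fun x => x) false) (i - 1) 0 - 1)) 0
    = pvMaxGap L := by
  rw [pv_A1, pv_gap_eq]
  unfold pvMaxGap
  rw [pv_B1]

-- ===== VERDICT (by name: the statement is the Claim_ definition above) =====
theorem largestArea_spec : Claim_equal_largestArea := by
  intro n m k enemy _hd _hp
  show largestArea n m k enemy = largestArea_alt n m k enemy
  simp only [largestArea, largestArea_alt]
  rw [pv_build]
  simp only [List.cons_append, List.nil_append]
  rw [pv_axis, pv_axis]
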